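-- pv_equiv track=rewrite | github.com/jellyfishing2346/TIP-class-assignments | Week-04/hackerrank/advanced-version-b/filter_and_modify.py | filter_and_modify
-- ===== SOURCE A (Python) =====
-- from collections import deque
--
-- def filter_and_modify(nums):
--     queue = deque()
--     for num in nums:
--         if num % 2 == 0:
--             queue.append(num * 2)
--         elif num > 10 and queue:
--             queue.popleft()
--     return list(queue)
-- ===== SOURCE B (Python) =====
-- def filter_and_modify(nums):
--     evens = [num * 2 for num in nums if num % 2 == 0]
--     size = 0
--     for num in nums:
--         if num % 2 == 0:
--             size += 1
--         elif num > 10 and size > 0: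
--             size -= 1
--     return evens[len(evens) - size:]
-- ===== Notes on version B (the rewrite author's own statement) =====
-- stated objective: alternative
-- what changed: Replaces the deque simulation by building the full list of doubled evens once and tracking only an integer surviving-queue size; the answer is the suffix of that list of that length, so no queue is ever mutated.
import Mathlib
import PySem

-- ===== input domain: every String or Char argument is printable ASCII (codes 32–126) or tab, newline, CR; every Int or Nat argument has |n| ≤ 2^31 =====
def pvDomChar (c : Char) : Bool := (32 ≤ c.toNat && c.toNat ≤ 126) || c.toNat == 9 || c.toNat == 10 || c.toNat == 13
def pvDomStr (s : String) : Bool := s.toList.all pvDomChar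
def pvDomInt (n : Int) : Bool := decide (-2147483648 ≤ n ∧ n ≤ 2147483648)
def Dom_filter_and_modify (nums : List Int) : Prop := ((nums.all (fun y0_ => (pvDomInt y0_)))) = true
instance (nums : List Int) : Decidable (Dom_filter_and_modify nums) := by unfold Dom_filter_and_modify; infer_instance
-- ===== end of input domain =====

-- B builds the doubled-evens list once and tracks only an integer queue size; the result is the suffix of that list (return value only; neither version mutates its argument).

-- ===== PORT A =====
def famLoop (q : List Int) : List Int → List Int
  | [] => q
  | num :: rest =>
    if num % 2 == 0 then famLoop (q ++ [num * 2]) rest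
    else if num > 10 ∧ q ≠ [] then famLoop q.tail rest
    else famLoop q rest

def filter_and_modify (nums : List Int) : List Int := famLoop [] nums

-- ===== PORT B =====
-- evens = [num * 2 for num in nums if num % 2 == 0]
def pvEvens (nums : List Int) : List Int :=
  nums.filterMap (fun num => if num % 2 == 0 then some (num * 2) else none)

-- the size loop
def pvSize (nums : List Int) : Int :=
  nums.foldl (fun s num => if num % 2 == 0 then s + 1
                           else if num > 10 ∧ s > 0 then s - 1 else s) 0

def filter_and_modify_alt (nums : List Int) : List Int :=
  PySem.List.slice (pvEvens nums) (some ((pvEvens nums).length - pvSize nums)) none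

-- ===== PRECONDITION & SPEC =====
def Spec_filter_and_modify (nums : List Int) (out : List Int) : Prop := out = filter_and_modify_alt nums
instance (nums : List Int) (out : List Int) : Decidable (Spec_filter_and_modify nums out) := by unfold Spec_filter_and_modify; infer_instance

-- ===== CLAIM (what is proved, stated in full; the proofs are below) =====
def Claim_equal_filter_and_modify : Prop := ∀ (nums : List Int), Dom_filter_and_modify nums → Spec_filter_and_modify nums (filter_and_modify nums)

-- ===== LEMMAS AND PROOFS =====
-- Nat version of the size loop, used only in the proofs
def sizeN (s : Nat) : List Int → Nat
  | [] => s
  | num :: rest =>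
    if num % 2 == 0 then sizeN (s + 1) rest
    else if num > 10 ∧ 0 < s then sizeN (s - 1) rest
    else sizeN s rest

theorem sizeN_le (rest : List Int) : ∀ s : Nat, sizeN s rest ≤ s + (pvEvens rest).length := by
  induction rest with
  | nil => intro s; simp [sizeN, pvEvens]
  | cons n rest ih =>
    intro s
    by_cases h : n % 2 == 0
    · have := ih (s + 1)
      simp only [sizeN, pvEvens, List.filterMap_cons, h, if_pos, List.length_cons] at *
      omega
    · by_cases h2 : n > 10 ∧ 0 < s
      · have := ih (s - 1)
        simp only [sizeN, pvEvens, List.filterMap_cons, h, Bool.false_eq_true, if_false,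
          h2, and_self, if_true] at *
        omega
      · have := ih s
        simp only [sizeN, pvEvens, List.filterMap_cons, h, Bool.false_eq_true, if_false,
          h2] at *
        omega

theorem pvSize_eq_sizeN (rest : List Int) : ∀ s : Nat,
    List.foldl (fun s num => if num % 2 == 0 then s + 1
                             else if num > 10 ∧ s > 0 then s - 1 else s) (s : Int) rest
      = ((sizeN s rest : Nat) : Int) := by
  induction rest with
  | nil => intro s; simp [sizeN]
  | cons n rest ih =>
    intro s
    rw [List.foldl_cons]
    by_cases h : n % 2 == 0
    · simp only [h, if_pos, sizeN]
      have hc : ((s : Int) + 1) = (((s + 1 : Nat) : Nat) : Int) := by push_cast; ring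
      rw [hc]; exact ih (s + 1)
    · by_cases h2 : n > 10 ∧ 0 < s
      · have h2' : n > 10 ∧ (s : Int) > 0 := ⟨h2.1, by exact_mod_cast h2.2⟩
        simp only [h, Bool.false_eq_true, if_false, h2', sizeN, h2]
        have hc : ((s : Int) - 1) = (((s - 1 : Nat) : Nat) : Int) := by omega
        rw [hc]; exact ih (s - 1)
      · have h2' : ¬ (n > 10 ∧ (s : Int) > 0) := by
          intro hh; exact h2 ⟨hh.1, by exact_mod_cast hh.2⟩
        simp only [h, Bool.false_eq_true, if_false, h2', h2, sizeN]
        exact ih s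

theorem famLoop_eq (rest : List Int) : ∀ q : List Int,
    famLoop q rest
      = (q ++ pvEvens rest).drop ((q.length + (pvEvens rest).length) - sizeN q.length rest) := by
  induction rest with
  | nil => intro q; simp [famLoop, sizeN, pvEvens]
  | cons n rest ih =>
    intro q
    by_cases h : n % 2 = 0
    · have hE : pvEvens (n :: rest) = n * 2 :: pvEvens rest := by
        unfold pvEvens
        rw [List.filterMap_cons_some (b := n * 2) (by simp [h])]
      have hS : sizeN q.length (n :: rest) = sizeN (q.length + 1) rest := by simp [sizeN, h]
      have hA : famLoop q (n :: rest) = famLoop (q ++ [n * 2]) rest := by simp [famLoop, h]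
      rw [hA, hE, hS, ih (q ++ [n * 2])]
      simp only [List.append_assoc, List.singleton_append, List.length_append,
        List.length_cons, List.length_nil, Nat.zero_add]
      congr 1
      omega
    · by_cases h2 : n > 10 ∧ q ≠ []
      · obtain ⟨a, t, rfl⟩ : ∃ a t, q = a :: t := by
          cases q with
          | nil => exact absurd rfl h2.2
          | cons a t => exact ⟨a, t, rfl⟩
        have hE : pvEvens (n :: rest) = pvEvens rest := by
          unfold pvEvens
          rw [List.filterMap_cons_none (by simp [h])]
        have hS : sizeN (a :: t).length (n :: rest) = sizeN t.length rest := by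
          simp [sizeN, h, h2.1]
        have hA : famLoop (a :: t) (n :: rest) = famLoop t rest := by simp [famLoop, h, h2.1]
        have hle := sizeN_le rest t.length
        have hk : (a :: t).length + (pvEvens rest).length - sizeN t.length rest
            = (t.length + (pvEvens rest).length - sizeN t.length rest) + 1 := by
          simp only [List.length_cons]; omega
        rw [hA, hE, hS, ih t, List.cons_append, hk, List.drop_succ_cons]
      · have h2n : ¬ (n > 10 ∧ 0 < q.length) := by
          intro hh
          exact h2 ⟨hh.1, by intro he; rw [he] at hh; simp at hh⟩
        have hE : pvEvens (n :: rest) = pvEvens rest := by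
          unfold pvEvens
          rw [List.filterMap_cons_none (by simp [h])]
        have hS : sizeN q.length (n :: rest) = sizeN q.length rest := by
          simp [sizeN, h, h2n]
        have hA : famLoop q (n :: rest) = famLoop q rest := by simp [famLoop, h, h2]
        rw [hA, hE, hS, ih q]

-- ===== VERDICT (by name: the statement is the Claim_ definition above) =====
theorem filter_and_modify_spec : Claim_equal_filter_and_modify := by
  intro nums _
  unfold Spec_filter_and_modify filter_and_modify filter_and_modify_alt
  have hle := sizeN_le nums 0
  have hsz : pvSize nums = ((sizeN 0 nums : Nat) : Int) := pvSize_eq_sizeN nums 0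
  have hcast : ((pvEvens nums).length : Int) - pvSize nums
      = (((pvEvens nums).length - sizeN 0 nums : Nat) : Int) := by
    rw [hsz]; omega
  rw [hcast, PySem.List.slice_from_natCast, famLoop_eq nums []]
  simp
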